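-- pv_equiv track=rewrite | github.com/pypi-data/pypi-mirror-404 | packages/git-rewrite/git_rewrite-0.5.0-py3-none-any.whl/git_rewrite/compose/run.py | compose_mappings
-- ===== SOURCE A (Python) =====
-- def compose_mappings(mappings: list[dict[str, str]]) -> dict[str, str]:
--     """
--     Compose multiple mappings into one.
--
--     Given mappings [A->B, B->C, C->D], produces A->D.
--     Each mapping is applied in order, following the chain.
--     """
--     if not mappings:
--         return {}
--
--     result = mappings[0].copy()
--
--     for next_mapping in mappings[1:]:
--         # For each key in result, follow the chain through next_mapping
--         new_result: dict[str, str] = {}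
--         for original, intermediate in result.items():
--             if intermediate in next_mapping:
--                 new_result[original] = next_mapping[intermediate]
--             else:
--                 # No mapping found, keep intermediate as final
--                 new_result[original] = intermediate
--         result = new_result
--
--     return result
-- ===== SOURCE B (Python) =====
-- def compose_mappings(mappings: list[dict[str, str]]) -> dict[str, str]:
--     """Key-major composition: thread each original key's value through the chain."""
--     if not mappings:
--         return {}
--     rest = mappings[1:]
--     result: dict[str, str] = {}
--     for key, val in mappings[0].items():
--         for m in rest:
--             val = m.get(val, val)
--         result[key] = val
--     return result
-- ===== Notes on version B (the rewrite author's own statement) =====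
-- stated objective: alternative
-- what changed: Key-major traversal: for each key of mappings[0] a single scalar value is threaded through the remaining mappings with m.get(val, val), instead of A's mapping-major rebuild of a fresh intermediate dict per round.
import Mathlib
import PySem

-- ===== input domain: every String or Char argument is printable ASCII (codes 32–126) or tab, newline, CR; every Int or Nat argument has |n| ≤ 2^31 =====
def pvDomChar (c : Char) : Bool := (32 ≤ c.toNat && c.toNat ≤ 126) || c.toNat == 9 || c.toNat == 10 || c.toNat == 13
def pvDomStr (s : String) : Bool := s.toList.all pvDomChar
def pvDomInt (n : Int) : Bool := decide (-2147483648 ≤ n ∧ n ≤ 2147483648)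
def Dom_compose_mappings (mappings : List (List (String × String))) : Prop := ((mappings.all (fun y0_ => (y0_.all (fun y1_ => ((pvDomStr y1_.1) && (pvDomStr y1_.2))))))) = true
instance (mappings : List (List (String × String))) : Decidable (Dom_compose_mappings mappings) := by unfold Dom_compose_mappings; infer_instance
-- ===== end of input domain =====

-- B replaces A's mapping-major rebuild of an intermediate dict per round by a key-major
-- traversal threading one scalar per original key (alternative decomposition, same cost).

-- ===== PORT A =====
-- one round of A's outer loop: rebuild new_result from result.items() through next_mapping
def cmRoundA (result : PySem.Dict String String) (next : List (String × String)) :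
    PySem.Dict String String :=
  let nm := PySem.Dict.ofList next
  result.items.foldl
    (fun nr p =>
      if nm.contains p.2 then nr.insert p.1 (nm.getD p.2 "") else nr.insert p.1 p.2)
    PySem.Dict.empty

def compose_mappings (mappings : List (List (String × String))) : List (String × String) :=
  match mappings with
  | [] => []
  | m0 :: rest => (rest.foldl cmRoundA (PySem.Dict.ofList m0)).items

-- ===== PORT B =====
def compose_mappings_alt (mappings : List (List (String × String))) : List (String × String) :=
  match mappings with
  | [] => []
  | m0 :: rest =>
    ((PySem.Dict.ofList m0).items.foldl
      (fun out p =>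
        out.insert p.1 (rest.foldl (fun v m => (PySem.Dict.ofList m).getD v v) p.2))
      PySem.Dict.empty).items

-- ===== PRECONDITION & SPEC =====
def Spec_compose_mappings (mappings : List (List (String × String))) (out : List (String × String)) : Prop := out = compose_mappings_alt mappings
instance (mappings : List (List (String × String))) (out : List (String × String)) : Decidable (Spec_compose_mappings mappings out) := by unfold Spec_compose_mappings; infer_instance

-- ===== CLAIM (what is proved, stated in full; the proofs are below) =====
def Claim_equal_compose_mappings : Prop := ∀ (mappings : List (List (String × String))), Dom_compose_mappings mappings → Spec_compose_mappings mappings (compose_mappings mappings)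

-- ===== LEMMAS AND PROOFS =====

-- A's branch on membership equals a single getD with the value itself as default
theorem cm_if_getD (nm : PySem.Dict String String) (v : String) :
    (if nm.contains v then nm.getD v "" else v) = nm.getD v v := by
  rw [PySem.Dict.contains_eq_isSome_get?, PySem.Dict.getD_eq_get?_getD,
    PySem.Dict.getD_eq_get?_getD]
  cases nm.get? v <;> simp

-- one A-round, on a dict with nodup keys, is a map over the items
theorem cmRoundA_items (d : PySem.Dict String String) (hnd : d.keys.Nodup)
    (next : List (String × String)) :
    (cmRoundA d next).items =
      d.items.map (fun p => (p.1, (PySem.Dict.ofList next).getD p.2 p.2)) := by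
  unfold cmRoundA
  have hfold :
      (d.items.foldl
        (fun nr p =>
          if (PySem.Dict.ofList next).contains p.2 then
            nr.insert p.1 ((PySem.Dict.ofList next).getD p.2 "")
          else nr.insert p.1 p.2)
        PySem.Dict.empty) =
      (d.items.foldl
        (fun nr p => nr.insert p.1 ((PySem.Dict.ofList next).getD p.2 p.2))
        PySem.Dict.empty) := by
    apply PySem.List.foldl_congr_mem
    intro nr p _
    rw [← cm_if_getD (PySem.Dict.ofList next) p.2]
    by_cases h : (PySem.Dict.ofList next).contains p.2 = true <;> simp [h]
  simp only [hfold]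
  rw [PySem.Dict.items_foldl_insert_fresh (k := fun p => p.1)
      (v := fun p => (PySem.Dict.ofList next).getD p.2 p.2)
      (l := d.items) (d := PySem.Dict.empty)
      (by intro a _; exact PySem.Dict.contains_empty _)
      (by simpa [PySem.Dict.keys] using hnd)]
  simp [PySem.Dict.empty]

-- main invariant: A's outer loop over rest, from any nodup-keyed dict, maps the threading fold
theorem cm_loop (rest : List (List (String × String))) :
    ∀ (d : PySem.Dict String String), d.keys.Nodup →
    (rest.foldl cmRoundA d).items =
      d.items.map (fun p =>
        (p.1, rest.foldl (fun v m => (PySem.Dict.ofList m).getD v v) p.2)) := by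
  induction rest with
  | nil => intro d _; simp
  | cons m rest ih =>
    intro d hnd
    have hitems := cmRoundA_items d hnd m
    have hkeys : (cmRoundA d m).keys.Nodup := by
      simp only [PySem.Dict.keys, hitems, List.map_map]
      simpa [Function.comp, PySem.Dict.keys] using hnd
    simp only [List.foldl_cons]
    rw [ih (cmRoundA d m) hkeys, hitems, List.map_map]
    rfl

-- ===== VERDICT (by name: the statement is the Claim_ definition above) =====
theorem compose_mappings_spec : Claim_equal_compose_mappings := by
  intro mappings _
  unfold Spec_compose_mappings compose_mappings compose_mappings_alt
  cases mappings with
  | nil => rfl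
  | cons m0 rest =>
    simp only
    rw [cm_loop rest (PySem.Dict.ofList m0) (PySem.Dict.nodup_keys_ofList m0)]
    rw [PySem.Dict.items_foldl_insert_fresh (k := fun p => p.1)
        (v := fun p => rest.foldl (fun v m => (PySem.Dict.ofList m).getD v v) p.2)
        (l := (PySem.Dict.ofList m0).items) (d := PySem.Dict.empty)
        (by intro a _; exact PySem.Dict.contains_empty _)
        (by simpa [PySem.Dict.keys] using PySem.Dict.nodup_keys_ofList m0)]
    simp [PySem.Dict.empty]
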